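-- pv_equiv track=rewrite | github.com/DylanBruner/VexEmulator | httpServer/utils.py | getArgsFromRequest
-- ===== SOURCE A (Python) =====
-- def getArgsFromRequest(route: str, request: str) -> list:
--     requestSplit = request.split('/')
--     routeSplit = route.split('/')
--
--     newRequest = ""
--
--     for i in range(len(routeSplit)):
--         if routeSplit[i] == requestSplit[i]:
--             pass
--         else:
--             newRequest += '/' + requestSplit[i]
--
--     newRequest = newRequest.split('/')
--     if '' in newRequest:
--         newRequest.remove('')
--
--     return newRequest
-- ===== SOURCE B (Python) =====
-- def getArgsFromRequest(route: str, request: str) -> list: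
--     return [rq for rt, rq in zip(route.split('/'), request.split('/')) if rt != rq]
-- ===== Notes on version B (the rewrite author's own statement) =====
-- stated objective: simpler
-- what changed: B zips the two '/'-split segment lists and collects the differing request segments directly into the result list, eliminating A's serialize-into-a-slash-prefixed-string, re-split and remove-one-'' post-processing.
-- outside the precondition, e.g. on getArgsFromRequest('a/b', 'x'): A raises IndexError, B returns ['x']
import Mathlib
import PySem

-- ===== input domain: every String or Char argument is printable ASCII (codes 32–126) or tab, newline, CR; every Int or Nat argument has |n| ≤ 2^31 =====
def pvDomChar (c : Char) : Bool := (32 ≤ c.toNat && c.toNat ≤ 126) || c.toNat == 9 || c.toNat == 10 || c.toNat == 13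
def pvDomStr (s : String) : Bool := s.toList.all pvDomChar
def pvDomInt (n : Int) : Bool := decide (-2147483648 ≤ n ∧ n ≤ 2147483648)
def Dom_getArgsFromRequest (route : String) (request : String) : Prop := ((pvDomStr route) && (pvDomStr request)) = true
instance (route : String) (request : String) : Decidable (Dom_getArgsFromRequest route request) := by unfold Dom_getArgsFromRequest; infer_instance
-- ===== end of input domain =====

-- B collects the differing request segments directly from the zipped segment lists, dissolving
-- A's build-string/re-split/remove-'' post-processing; objective: simpler (same return value on Pre_).

-- ===== PORT A =====
def getArgsFromRequest (route : String) (request : String) : List String :=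
  let requestSplit := PySem.Chars.splitOn request.toList ['/']    -- request.split('/')
  let routeSplit := PySem.Chars.splitOn route.toList ['/']        -- route.split('/')
  let newRequest : List Char :=                                   -- the accumulated string, as chars
    (PySem.List.pyRange 0 (routeSplit.length : Int) 1).foldl
      (fun acc i =>
        if PySem.List.pyGetD routeSplit i [] = PySem.List.pyGetD requestSplit i [] then acc
        else acc ++ '/' :: PySem.List.pyGetD requestSplit i []) []
  let pieces := PySem.Chars.splitOn newRequest ['/']
  let pieces' := if pieces.contains ([] : List Char) then (PySem.List.remove? pieces []).getD pieces else pieces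
  pieces'.map (fun cs => String.ofList cs)

-- ===== PORT B =====
def getArgsFromRequest_alt (route : String) (request : String) : List String :=
  ((PySem.Chars.splitOn route.toList ['/']).zip (PySem.Chars.splitOn request.toList ['/'])).filterMap
    (fun p => if p.1 ≠ p.2 then some (String.ofList p.2) else none)

-- ===== PRECONDITION & SPEC =====
-- A indexes requestSplit[i] for every i below len(routeSplit), so it raises IndexError exactly
-- when route splits into more '/'-segments than request; Pre_ excludes exactly those inputs.
def Pre_getArgsFromRequest (route : String) (request : String) : Prop :=
  (PySem.Chars.splitOn route.toList ['/']).length ≤ (PySem.Chars.splitOn request.toList ['/']).length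
instance (route : String) (request : String) : Decidable (Pre_getArgsFromRequest route request) := by unfold Pre_getArgsFromRequest; infer_instance
def pvWitness_getArgsFromRequest : String × String := ("user/a/info", "user/7/info")

def Spec_getArgsFromRequest (route : String) (request : String) (out : List String) : Prop := out = getArgsFromRequest_alt route request
instance (route : String) (request : String) (out : List String) : Decidable (Spec_getArgsFromRequest route request out) := by unfold Spec_getArgsFromRequest; infer_instance

-- ===== CLAIM (what is proved, stated in full; the proofs are below) =====
def Claim_equal_getArgsFromRequest : Prop := ∀ (route : String) (request : String), Dom_getArgsFromRequest route request → Pre_getArgsFromRequest route request → Spec_getArgsFromRequest route request (getArgsFromRequest route request)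

-- ===== LEMMAS AND PROOFS =====

def pvSplit (pre : List Char) : List Char → List (List Char)
  | [] => [pre]
  | c :: rest => if c = '/' then pre :: pvSplit [] rest else pvSplit (pre ++ [c]) rest

theorem pvGo_eq (f : Nat) : ∀ (l : List Char), l.length < f → ∀ (cur : List Char) (acc : List (List Char)),
    PySem.Chars.splitOn.go ['/'] f l cur acc = acc.reverse ++ pvSplit cur.reverse l := by
  induction f with
  | zero => intro l hl; omega
  | succ f ih =>
    intro l hl cur acc
    cases l with
    | nil => simp [PySem.Chars.splitOn.go, pvSplit]
    | cons c rest =>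
      rw [PySem.Chars.splitOn.go]
      by_cases hc : c = '/'
      · subst hc
        rw [if_pos (by simp [List.isPrefixOf])]
        simp only [List.length_singleton, List.drop_succ_cons, List.drop_zero]
        rw [ih rest (by simp at hl; omega) [] (List.reverse cur :: acc)]
        simp [pvSplit]
      · rw [if_neg (by simp [List.isPrefixOf]; exact fun h => hc h.symm)]
        rw [ih rest (by simp at hl; omega) (c :: cur) acc]
        simp [pvSplit, hc]

theorem pvSplitOn_eq (s : List Char) : PySem.Chars.splitOn s ['/'] = pvSplit [] s := by
  rw [PySem.Chars.splitOn]
  rw [pvGo_eq (s.length + 1) s (by omega) [] []]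
  simp

theorem pvSplit_no_sep (s : List Char) : ∀ pre p, p ∈ pvSplit pre s → '/' ∉ pre → '/' ∉ p := by
  induction s with
  | nil => intro pre p hp hpre; simp [pvSplit] at hp; subst hp; exact hpre
  | cons c rest ih =>
    intro pre p hp hpre
    by_cases hc : c = '/'
    · subst hc; simp [pvSplit] at hp
      rcases hp with h | h
      · subst h; exact hpre
      · exact ih [] p h (by simp)
    · simp [pvSplit, hc] at hp
      exact ih (pre ++ [c]) p hp (by simp [hpre, Ne.symm hc])

theorem pvSplit_append (d : List Char) (h : '/' ∉ d) : ∀ pre t, pvSplit pre (d ++ t) = pvSplit (pre ++ d) t := by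
  induction d with
  | nil => simp
  | cons c rest ih =>
    intro pre t
    have hc : ¬ c = '/' := fun hh => h (by simp [hh])
    simp only [List.cons_append, pvSplit, if_neg hc]
    rw [ih (fun hh => h (by simp [hh])) (pre ++ [c]) t]
    simp

theorem pvSplit_flat (ds : List (List Char)) : ∀ pre, (∀ d ∈ ds, '/' ∉ d) →
    pvSplit pre ((ds.map (fun d => '/' :: d)).flatten) = pre :: ds := by
  induction ds with
  | nil => intro pre _; simp [pvSplit]
  | cons d rest ih =>
    intro pre hds
    simp only [List.map_cons, List.flatten_cons, List.cons_append, pvSplit, if_true]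
    rw [pvSplit_append d (hds d (by simp)) [] _]
    simp only [List.nil_append]
    rw [ih d (fun x hx => hds x (by simp [hx]))]

theorem pvRangeFlat (xs : List (List Char)) : ∀ (ys : List (List Char)), xs.length ≤ ys.length →
    (List.range xs.length).flatMap
        (fun i => if xs.getD i [] = ys.getD i [] then [] else '/' :: ys.getD i []) =
      (((xs.zip ys).filterMap (fun p => if p.1 = p.2 then none else some p.2)).map
        (fun d => '/' :: d)).flatten := by
  induction xs with
  | nil => simp
  | cons x xs ih =>
    intro ys hlen
    cases ys with
    | nil => simp at hlen
    | cons y ys =>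
      simp only [List.length_cons, List.range_succ_eq_map, List.flatMap_cons, List.flatMap_map,
        List.getD_cons_zero, List.getD_cons_succ, List.zip_cons_cons, List.filterMap_cons]
      by_cases hxy : x = y
      · simp only [if_pos hxy, List.nil_append]
        exact ih ys (by simp at hlen; omega)
      · simp only [if_neg hxy, List.map_cons, List.flatten_cons]
        rw [ih ys (by simp at hlen; omega)]

theorem pvMain (route request : String)
    (hpre : (PySem.Chars.splitOn route.toList ['/']).length ≤ (PySem.Chars.splitOn request.toList ['/']).length) :
    getArgsFromRequest route request = getArgsFromRequest_alt route request := by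
  unfold getArgsFromRequest getArgsFromRequest_alt
  set rs := PySem.Chars.splitOn route.toList ['/'] with hrs
  set qs := PySem.Chars.splitOn request.toList ['/'] with hqs
  simp only []
  set ds := (rs.zip qs).filterMap (fun p => if p.1 = p.2 then none else some p.2) with hds
  have hqs_no : ∀ d ∈ qs, '/' ∉ d := by
    intro d hd
    rw [hqs, pvSplitOn_eq] at hd
    exact pvSplit_no_sep request.toList [] d hd (by simp)
  have hds_no : ∀ d ∈ ds, '/' ∉ d := by
    intro d hd
    rw [hds, List.mem_filterMap] at hd
    obtain ⟨p, hp, hpd⟩ := hd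
    by_cases h12 : p.1 = p.2
    · simp [h12] at hpd
    · simp [h12] at hpd
      subst hpd
      exact hqs_no p.2 (List.of_mem_zip (a := p.1) (b := p.2) hp).2
  have hfold : (PySem.List.pyRange 0 (rs.length : Int) 1).foldl
      (fun acc i =>
        if PySem.List.pyGetD rs i [] = PySem.List.pyGetD qs i [] then acc
        else acc ++ '/' :: PySem.List.pyGetD qs i []) []
      = (ds.map (fun d => '/' :: d)).flatten := by
    have hfun : (fun (acc : List Char) (i : Int) =>
        if PySem.List.pyGetD rs i [] = PySem.List.pyGetD qs i [] then acc
        else acc ++ '/' :: PySem.List.pyGetD qs i [])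
      = (fun acc i => acc ++ (if PySem.List.pyGetD rs i [] = PySem.List.pyGetD qs i [] then [] else '/' :: PySem.List.pyGetD qs i [])) := by
      funext acc i; split <;> simp
    rw [hfun, PySem.List.foldl_append_eq_flatMap, PySem.List.pyRange_zero_nat, List.flatMap_map]
    simp only [PySem.List.pyGetD_natCast]
    rw [hds, pvRangeFlat rs qs hpre]
    simp
  rw [hfold, pvSplitOn_eq, pvSplit_flat ds [] hds_no]
  simp only [List.contains_cons, BEq.rfl, Bool.true_or, if_true, PySem.List.remove?_cons_self,
    Option.getD_some]
  rw [List.map_filterMap]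
  congr 1
  funext p
  by_cases h12 : p.1 = p.2 <;> simp [h12]

-- ===== VERDICT (by name: the statement is the Claim_ definition above) =====
theorem getArgsFromRequest_spec : Claim_equal_getArgsFromRequest := by
  intro route request _ hpre
  exact pvMain route request hpre
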